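-- pv_equiv track=rewrite | github.com/AlexYM07/algoritmos_python2 | 11_suma_pares_impares_lista_anidada.py | sumas_pares_impares
-- ===== SOURCE A (Python) =====
-- def sumas_pares_impares(lista_anidada):
--     resultado = []  # Lista principal donde guardaremos los resultados por sublista
--
--     for sublista in lista_anidada:  # Recorremos cada sublista
--         suma_pares = 0   # Inicializamos la suma de pares de esta sublista
--         suma_impares = 0 # Inicializamos la suma de impares de esta sublista
--
--         for numero in sublista:  # Recorremos cada número de la sublista
--             if numero % 2 == 0:   # Si el número es par
--                 suma_pares += numero
--             else:                 # Si el número es impar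
--                 suma_impares += numero
--
--         # Una vez que terminamos la sublista, guardamos los resultados
--         resultado.append({"pares": suma_pares, "impares": suma_impares})
--
--     return resultado  # Devolvemos la lista completa
-- ===== SOURCE B (Python) =====
-- def sumas_pares_impares(lista_anidada):
--     # Branch-free: impares = sum of n*(n % 2) (n % 2 is 0 or 1 in Python),
--     # pares = total - impares; no parity test/branch anywhere.
--     resultado = []
--     for sublista in lista_anidada:
--         impares = sum(n * (n % 2) for n in sublista)
--         resultado.append({"pares": sum(sublista) - impares, "impares": impares})
--     return resultado
-- ===== Notes on version B (the rewrite author's own statement) =====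
-- stated objective: alternative
-- what changed: Replaces the parity branch entirely: odds are summed branch-free as sum(n*(n%2)) (n%2 is 0 or 1 in Python) and evens are recovered arithmetically as total-sum minus odds, instead of testing each element and routing it to one of two accumulators.
import Mathlib
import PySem

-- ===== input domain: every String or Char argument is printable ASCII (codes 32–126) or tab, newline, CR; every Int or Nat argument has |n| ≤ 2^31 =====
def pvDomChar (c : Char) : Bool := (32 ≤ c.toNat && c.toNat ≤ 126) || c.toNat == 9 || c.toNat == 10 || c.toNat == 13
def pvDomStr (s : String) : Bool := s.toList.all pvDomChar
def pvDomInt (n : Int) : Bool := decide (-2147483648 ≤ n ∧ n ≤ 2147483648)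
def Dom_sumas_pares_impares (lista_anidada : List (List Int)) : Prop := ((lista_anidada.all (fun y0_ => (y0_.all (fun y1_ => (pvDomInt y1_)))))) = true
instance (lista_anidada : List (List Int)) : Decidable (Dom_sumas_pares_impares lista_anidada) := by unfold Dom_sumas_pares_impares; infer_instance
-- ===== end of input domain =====

-- B removes the parity branch: odds = Σ n·(n % 2) (branch-free mask), evens = total − odds (objective: alternative).
-- ===== PORT A =====
def sumas_pares_impares (lista_anidada : List (List Int)) : List (List (String × Int)) :=
  lista_anidada.foldl (fun resultado sublista =>
    let sums := sublista.foldl (fun (acc : Int × Int) numero =>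
      if PySem.Int.mod numero 2 = 0 then (acc.1 + numero, acc.2) else (acc.1, acc.2 + numero))
      (0, 0)
    resultado ++ [[("pares", sums.1), ("impares", sums.2)]]) []

-- ===== PORT B =====
def sumas_pares_impares_alt (lista_anidada : List (List Int)) : List (List (String × Int)) :=
  lista_anidada.map (fun sublista =>
    let impares := (sublista.map (fun n => n * PySem.Int.mod n 2)).sum
    [("pares", sublista.sum - impares), ("impares", impares)])

-- ===== PRECONDITION & SPEC =====
def Spec_sumas_pares_impares (lista_anidada : List (List Int)) (out : List (List (String × Int))) : Prop := out = sumas_pares_impares_alt lista_anidada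
instance (lista_anidada : List (List Int)) (out : List (List (String × Int))) : Decidable (Spec_sumas_pares_impares lista_anidada out) := by unfold Spec_sumas_pares_impares; infer_instance

-- ===== CLAIM (what is proved, stated in full; the proofs are below) =====
def Claim_equal_sumas_pares_impares : Prop := ∀ (lista_anidada : List (List Int)), Dom_sumas_pares_impares lista_anidada → Spec_sumas_pares_impares lista_anidada (sumas_pares_impares lista_anidada)

-- ===== LEMMAS AND PROOFS =====

theorem inner_foldl_eq (sub : List Int) (p i : Int) :
    sub.foldl (fun (acc : Int × Int) numero =>
      if PySem.Int.mod numero 2 = 0 then (acc.1 + numero, acc.2) else (acc.1, acc.2 + numero))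
      (p, i)
    = (p + (sub.sum - (sub.map (fun n => n * PySem.Int.mod n 2)).sum),
       i + (sub.map (fun n => n * PySem.Int.mod n 2)).sum) := by
  induction sub generalizing p i with
  | nil => simp
  | cons x xs ih =>
    rw [List.foldl_cons, List.map_cons, List.sum_cons, List.sum_cons]
    rcases PySem.Int.mod_two_eq x with hx | hx
    · rw [if_pos hx, ih, hx]
      exact Prod.ext (by ring) (by ring)
    · rw [if_neg (by omega), ih, hx]
      exact Prod.ext (by ring) (by ring)

theorem outer_foldl_eq (l : List (List Int)) (acc : List (List (String × Int))) :
    l.foldl (fun resultado sublista =>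
      let sums := sublista.foldl (fun (acc : Int × Int) numero =>
        if PySem.Int.mod numero 2 = 0 then (acc.1 + numero, acc.2) else (acc.1, acc.2 + numero))
        (0, 0)
      resultado ++ [[("pares", sums.1), ("impares", sums.2)]]) acc
    = acc ++ sumas_pares_impares_alt l := by
  induction l generalizing acc with
  | nil => simp [sumas_pares_impares_alt]
  | cons s l ih =>
    rw [List.foldl_cons, ih]
    simp only [inner_foldl_eq, zero_add, sumas_pares_impares_alt, List.map_cons]
    simp

-- ===== VERDICT (by name: the statement is the Claim_ definition above) =====
theorem sumas_pares_impares_spec : Claim_equal_sumas_pares_impares := by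
  intro l _
  unfold Spec_sumas_pares_impares sumas_pares_impares
  simpa using outer_foldl_eq l []
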